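-- pv_equiv track=rewrite | github.com/JoaoNunoAbreu/advent-of-code | 2021/day15/main.py | generate_big_map
-- ===== SOURCE A (Python) =====
-- def generate_big_map_step(matrix):
--     res = []
--     for line in matrix:
--         new_line = []
--         for num in line:
--             if(num == 9):
--                 new_line.append(1)
--             else:
--                 new_line.append(num+1)
--
--         res.append(new_line)
--     return res
--
-- def generate_big_map(matrix):
--     l = [matrix]
--     for _ in range(8):
--         matrix = generate_big_map_step(matrix)
--         l.append(matrix)
--
--     full_matrix = [
--         [l[0], l[1], l[2], l[3], l[4]],
--         [l[1], l[2], l[3], l[4], l[5]],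
--         [l[2], l[3], l[4], l[5], l[6]],
--         [l[3], l[4], l[5], l[6], l[7]],
--         [l[4], l[5], l[6], l[7], l[8]],
--     ]
--
--     processed_matrix = []
--     for line in full_matrix:
--         l = concat_list_of_matrices(line)
--         for i in l:
--             processed_matrix.append(i)
--
--     return processed_matrix
--
-- def concat_list_of_matrices(l):
--     res = []
--     for i in l:
--         res = concat_matrices(res, i)
--     return res
--
-- def concat_matrices(matrix1, matrix2):
--     res = []
--     if(len(matrix1) == 0):
--         return matrix2
--     if(len(matrix2) == 0):
--         return matrix1
--     for i in range(len(matrix1)):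
--         res.append(matrix1[i] + matrix2[i])
--     return res
-- ===== SOURCE B (Python) =====
-- def generate_big_map(matrix):
--     res = []
--     for ti in range(5):
--         for row in matrix:
--             new_row = []
--             for tj in range(5):
--                 for num in row:
--                     v = num
--                     for _ in range(ti + tj):
--                         v = 1 if v == 9 else v + 1
--                     new_row.append(v)
--             res.append(new_row)
--     return res
-- ===== Notes on version B (the rewrite author's own statement) =====
-- stated objective: simpler
-- what changed: B builds the 5x5 tiled map directly with nested loops, computing each cell by iterating the +1-with-wrap-at-9 step ti+tj times, instead of precomputing nine stepped copies and concatenating matrices row-wise.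
import Mathlib
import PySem

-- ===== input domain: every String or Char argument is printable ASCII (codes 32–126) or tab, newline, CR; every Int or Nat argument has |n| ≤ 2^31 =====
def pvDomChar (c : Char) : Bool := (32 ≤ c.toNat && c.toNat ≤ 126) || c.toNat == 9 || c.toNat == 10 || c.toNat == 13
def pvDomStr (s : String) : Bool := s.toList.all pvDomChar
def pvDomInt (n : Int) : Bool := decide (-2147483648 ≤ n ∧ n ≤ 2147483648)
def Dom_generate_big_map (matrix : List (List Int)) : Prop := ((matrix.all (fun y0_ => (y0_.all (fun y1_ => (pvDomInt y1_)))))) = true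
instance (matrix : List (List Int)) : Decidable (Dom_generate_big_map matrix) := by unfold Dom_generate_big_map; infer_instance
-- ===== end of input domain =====

-- B builds the 5x5 tiled map directly with nested loops (iterating the wrap-at-9 step ti+tj times per cell)
-- instead of precomputing nine stepped copies and concatenating matrices; objective: simpler decomposition, same cost.


-- ===== PORT A =====
def gbmStep (matrix : List (List Int)) : List (List Int) :=
  matrix.foldl (fun res line =>
    res ++ [line.foldl (fun nl num => nl ++ [if num = 9 then (1:Int) else num + 1]) []]) []

-- the indices i are in range of both matrices in every call A makes (equal row counts), so `.getD []` is exact there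
def concatMatrices (m1 m2 : List (List Int)) : List (List Int) :=
  if m1.length = 0 then m2
  else if m2.length = 0 then m1
  else (List.range m1.length).foldl
    (fun res i => res ++ [((PySem.List.pyGet? m1 (i:Int)).getD []) ++ ((PySem.List.pyGet? m2 (i:Int)).getD [])]) []

def concatListOfMatrices (l : List (List (List Int))) : List (List Int) :=
  l.foldl (fun res i => concatMatrices res i) []

def generate_big_map (matrix : List (List Int)) : List (List Int) :=
  let st := (List.range 8).foldl
    (fun (st : List (List (List Int)) × List (List Int)) _ =>
      let m' := gbmStep st.2
      (st.1 ++ [m'], m')) ([matrix], matrix)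
  let l := st.1
  let g := fun (k : Nat) => (PySem.List.pyGet? l (k:Int)).getD []
  let fullMatrix : List (List (List (List Int))) :=
    [[g 0, g 1, g 2, g 3, g 4],
     [g 1, g 2, g 3, g 4, g 5],
     [g 2, g 3, g 4, g 5, g 6],
     [g 3, g 4, g 5, g 6, g 7],
     [g 4, g 5, g 6, g 7, g 8]]
  fullMatrix.foldl (fun pm line => (concatListOfMatrices line).foldl (fun pm i => pm ++ [i]) pm) []

-- ===== PORT B =====
def generate_big_map_alt (matrix : List (List Int)) : List (List Int) :=
  (List.range 5).foldl (fun res ti =>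
    matrix.foldl (fun res row =>
      res ++ [(List.range 5).foldl (fun nr tj =>
        row.foldl (fun nr num =>
          nr ++ [(List.range (ti + tj)).foldl (fun v _ => if v = 9 then 1 else v + 1) num]) nr) []]) res) []

-- ===== PRECONDITION & SPEC =====
def Spec_generate_big_map (matrix : List (List Int)) (out : List (List Int)) : Prop := out = generate_big_map_alt matrix
instance (matrix : List (List Int)) (out : List (List Int)) : Decidable (Spec_generate_big_map matrix out) := by unfold Spec_generate_big_map; infer_instance

-- ===== CLAIM (what is proved, stated in full; the proofs are below) =====
def Claim_equal_generate_big_map : Prop := ∀ (matrix : List (List Int)), Dom_generate_big_map matrix → Spec_generate_big_map matrix (generate_big_map matrix)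

-- ===== LEMMAS AND PROOFS =====

/-- applying the wrap-at-9 step `k` times -/
def pvIter (k : Nat) (v : Int) : Int :=
  (List.range k).foldl (fun v _ => if v = 9 then 1 else v + 1) v

/-- the rows of tile-row `ti` of the big map -/
def pvBlock (ti : Nat) (m : List (List Int)) : List (List Int) :=
  m.map (fun r => r.map (pvIter ti) ++ r.map (pvIter (ti+1)) ++ r.map (pvIter (ti+2))
    ++ r.map (pvIter (ti+3)) ++ r.map (pvIter (ti+4)))

theorem pvIter_succ (k : Nat) (v : Int) :
    pvIter (k + 1) v = (if pvIter k v = 9 then 1 else pvIter k v + 1) := by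
  simp [pvIter, List.range_succ]

theorem gbmStep_map_iter (m : List (List Int)) (k : Nat) :
    gbmStep (m.map (fun r => r.map (pvIter k))) = m.map (fun r => r.map (pvIter (k + 1))) := by
  simp only [gbmStep, PySem.List.foldl_append_singleton_eq_map, List.nil_append,
    List.map_map, Function.comp_def]
  simp only [← pvIter_succ]

theorem map_iter_zero (m : List (List Int)) : m.map (fun r => r.map (pvIter 0)) = m := by
  simp [show pvIter 0 = id from rfl]

theorem map_pvIter_zero (r : List Int) : r.map (pvIter 0) = r := by
  simp [show pvIter 0 = id from rfl]

theorem concatMatrices_nil_left (m : List (List Int)) : concatMatrices [] m = m := by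
  simp [concatMatrices]

theorem concatMatrices_map (m : List (List Int)) (f g : List Int → List Int) :
    concatMatrices (m.map f) (m.map g) = m.map (fun r => f r ++ g r) := by
  cases m with
  | nil => simp [concatMatrices]
  | cons a t =>
    unfold concatMatrices
    rw [if_neg (by simp), if_neg (by simp)]
    rw [PySem.List.foldl_append_singleton_eq_map, List.nil_append]
    simp only [bind_pure_comp, List.map_eq_map, List.map_map]
    apply List.ext_getElem
    · simp
    · intro i h1 h2
      rw [List.getElem_map, List.getElem_range]
      simp only [Function.comp_apply, PySem.List.pyGet?_natCast]
      have hi : i < (a :: t).length := by simpa using h2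
      show (List.map f (a::t))[i]?.getD [] ++ (List.map g (a::t))[i]?.getD []
          = (List.map (fun r => f r ++ g r) (a::t))[i]
      rw [List.getElem?_map, List.getElem?_map, List.getElem_map, List.getElem?_eq_getElem hi]
      simp

theorem concatMatrices_map_left_id (m : List (List Int)) (g : List Int → List Int) :
    concatMatrices m (m.map g) = m.map (fun r => r ++ g r) := by
  simpa using concatMatrices_map m id g

theorem A_eq (m : List (List Int)) :
    generate_big_map m = pvBlock 0 m ++ pvBlock 1 m ++ pvBlock 2 m ++ pvBlock 3 m ++ pvBlock 4 m := by
  have h1 : gbmStep m = m.map (fun r => r.map (pvIter 1)) := by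
    have h := gbmStep_map_iter m 0
    rw [map_iter_zero] at h
    simpa using h
  have h2 : gbmStep (gbmStep m) = m.map (fun r => r.map (pvIter 2)) := by
    rw [h1]; exact gbmStep_map_iter m 1
  have h3 : gbmStep (gbmStep (gbmStep m)) = m.map (fun r => r.map (pvIter 3)) := by
    rw [h2]; exact gbmStep_map_iter m 2
  have h4 : gbmStep (gbmStep (gbmStep (gbmStep m))) = m.map (fun r => r.map (pvIter 4)) := by
    rw [h3]; exact gbmStep_map_iter m 3
  have h5 : gbmStep (gbmStep (gbmStep (gbmStep (gbmStep m)))) = m.map (fun r => r.map (pvIter 5)) := by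
    rw [h4]; exact gbmStep_map_iter m 4
  have h6 : gbmStep (gbmStep (gbmStep (gbmStep (gbmStep (gbmStep m))))) = m.map (fun r => r.map (pvIter 6)) := by
    rw [h5]; exact gbmStep_map_iter m 5
  have h7 : gbmStep (gbmStep (gbmStep (gbmStep (gbmStep (gbmStep (gbmStep m)))))) = m.map (fun r => r.map (pvIter 7)) := by
    rw [h6]; exact gbmStep_map_iter m 6
  have h8 : gbmStep (gbmStep (gbmStep (gbmStep (gbmStep (gbmStep (gbmStep (gbmStep m))))))) = m.map (fun r => r.map (pvIter 8)) := by
    rw [h7]; exact gbmStep_map_iter m 7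
  unfold generate_big_map
  simp only [List.range_succ, List.range_zero, List.foldl_append, List.foldl_cons, List.foldl_nil,
    List.nil_append]
  rw [h8, h7, h6, h5, h4, h3, h2, h1]
  simp only [List.cons_append, List.nil_append]
  simp only [PySem.List.pyGet?_natCast, List.getElem?_cons_zero, List.getElem?_cons_succ,
    Option.getD_some]
  simp only [concatListOfMatrices, List.foldl_cons, List.foldl_nil, concatMatrices_nil_left,
    concatMatrices_map_left_id, concatMatrices_map, PySem.List.foldl_append_singleton,
    List.nil_append]
  simp [pvBlock, map_pvIter_zero]

theorem B_eq (m : List (List Int)) :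
    generate_big_map_alt m = pvBlock 0 m ++ pvBlock 1 m ++ pvBlock 2 m ++ pvBlock 3 m ++ pvBlock 4 m := by
  have hfold : ∀ (k : Nat) (v : Int),
      (List.range k).foldl (fun v _ => if v = 9 then 1 else v + 1) v = pvIter k v := fun _ _ => rfl
  unfold generate_big_map_alt
  simp only [hfold]
  simp only [List.range_succ, List.range_zero, List.foldl_append, List.foldl_cons, List.foldl_nil,
    List.nil_append, PySem.List.foldl_append_singleton_eq_map]
  simp [pvBlock]

-- ===== VERDICT (by name: the statement is the Claim_ definition above) =====
theorem generate_big_map_spec : Claim_equal_generate_big_map := by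
  intro matrix _
  unfold Spec_generate_big_map
  rw [A_eq, B_eq]
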